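-- pv_equiv track=rewrite | github.com/mr258876/Project-Puncher | Utilities/Punch Over BLE/HolePuncher_BLE.py | _optimizeNoteSequence
-- ===== SOURCE A (Python) =====
-- from typing import List, Iterable, Union
--
-- def _optimizeNoteSequence(nL) -> List:
--     # 优化同一拍内打孔顺序
--     resultList: List = []
--     tempList: List = []
--     d = True
--     for n in nL:
--         if not tempList:
--             tempList.append(n)
--             continue
--
--         if n[0] != tempList[0][0]:
--             tempList.sort(key=lambda x: x[1] if d else -x[1])
--             resultList = resultList + tempList
--
--             d = not d
--             tempList = [n]
--         else:
--             tempList.append(n)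
--     resultList = resultList + tempList
--     return resultList
-- ===== SOURCE B (Python) =====
-- from typing import List
--
-- def _optimizeNoteSequence(nL) -> List:
--     # Run decomposition: repeatedly peel the leading run of equal-key notes off the
--     # remaining list, sort it (direction alternates per run) unless it is the final
--     # run, and append it to the output.
--     out: List = []
--     rest = list(nL)
--     asc = True
--     while rest:
--         i = 1
--         while i < len(rest) and rest[i][0] == rest[0][0]:
--             i += 1
--         run, rest = rest[:i], rest[i:]
--         if rest:
--             run = sorted(run, key=(lambda x: x[1]) if asc else (lambda x: -x[1]))
--         out += run
--         asc = not asc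
--     return out
-- ===== Notes on version B (the rewrite author's own statement) =====
-- stated objective: alternative
-- what changed: A's stateful single pass with a pending tempList/result accumulator and a flipping flag is replaced by a recursive run decomposition: peel the leading run of equal-key notes, sort it by note[1] (negated on alternate runs) unless it is the final run, and concatenate with the recursion on the rest.
import Mathlib
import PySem

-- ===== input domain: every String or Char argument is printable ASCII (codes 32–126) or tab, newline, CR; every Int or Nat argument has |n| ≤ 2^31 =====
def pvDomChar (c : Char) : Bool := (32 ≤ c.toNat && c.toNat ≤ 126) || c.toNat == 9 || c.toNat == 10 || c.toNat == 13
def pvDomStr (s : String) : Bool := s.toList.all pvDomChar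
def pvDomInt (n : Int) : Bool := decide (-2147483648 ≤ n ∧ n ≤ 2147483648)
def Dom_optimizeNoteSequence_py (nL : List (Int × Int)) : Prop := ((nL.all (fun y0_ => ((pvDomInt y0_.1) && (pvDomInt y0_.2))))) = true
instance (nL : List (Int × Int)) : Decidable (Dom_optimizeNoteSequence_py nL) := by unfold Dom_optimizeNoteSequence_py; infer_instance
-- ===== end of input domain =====

-- B replaces A's stateful single-pass boundary detection by a recursive run decomposition
-- (peel the leading equal-key run, sort it unless it is the final run, alternate direction).


-- ===== PORT A =====
-- loop body: state (resultList, tempList, d); tempList[0][0] is read via the head pattern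
-- (tempList is nonempty in that branch, so this is exact)
def pyStepA (s : List (Int × Int) × List (Int × Int) × Bool) (n : Int × Int) :
    List (Int × Int) × List (Int × Int) × Bool :=
  match s with
  | (res, temp, d) =>
    match temp with
    | [] => (res, temp ++ [n], d)
    | t0 :: _ =>
      if n.1 ≠ t0.1 then
        (res ++ PySem.List.sorted temp (fun x => if d then x.2 else -x.2) false, [n], !d)
      else (res, temp ++ [n], d)

def optimizeNoteSequence_py (nL : List (Int × Int)) : List (Int × Int) :=
  match nL.foldl pyStepA ([], [], true) with
  | (res, temp, _) => res ++ temp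

-- ===== PORT B =====
-- the while loop 'i = 1; while i < len(nL) and nL[i][0] == nL[0][0]: i += 1':
-- runLen counts how far the run of nL[0]'s key continues in the tail (i = 1 + runLen)
def runLen (k : Int) : List (Int × Int) → Nat
  | [] => 0
  | x :: xs => if x.1 = k then runLen k xs + 1 else 0

-- the outer 'while rest:' loop, carrying (rest, asc, out); the slices rest[:i], rest[i:]
-- have 1 ≤ i ≤ len(rest), so take/drop are exact here
def emitRuns : List (Int × Int) → Bool → List (Int × Int) → List (Int × Int)
  | [], _, out => out
  | x :: xs, asc, out =>
    let m := runLen x.1 xs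
    let run := x :: xs.take m
    let rest := xs.drop m
    emitRuns rest (!asc)
      (out ++ (if rest = [] then run
               else PySem.List.sorted run (fun y => if asc then y.2 else -y.2) false))
termination_by rest _ _ => rest.length
decreasing_by simp

def optimizeNoteSequence_py_alt (nL : List (Int × Int)) : List (Int × Int) :=
  emitRuns nL true []

-- ===== PRECONDITION & SPEC =====
def Spec_optimizeNoteSequence_py (nL : List (Int × Int)) (out : List (Int × Int)) : Prop := out = optimizeNoteSequence_py_alt nL
instance (nL : List (Int × Int)) (out : List (Int × Int)) : Decidable (Spec_optimizeNoteSequence_py nL out) := by unfold Spec_optimizeNoteSequence_py; infer_instance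

-- ===== CLAIM (what is proved, stated in full; the proofs are below) =====
def Claim_equal_optimizeNoteSequence_py : Prop := ∀ (nL : List (Int × Int)), Dom_optimizeNoteSequence_py nL → Spec_optimizeNoteSequence_py nL (optimizeNoteSequence_py nL)

-- ===== LEMMAS AND PROOFS =====

-- A's fold, started from an arbitrary state, with the final 'resultList + tempList' applied
def pvRun (res temp : List (Int × Int)) (d : Bool) (xs : List (Int × Int)) : List (Int × Int) :=
  match xs.foldl pyStepA (res, temp, d) with
  | (r, t, _) => r ++ t

lemma pvRun_cons (res temp : List (Int × Int)) (d : Bool) (x : Int × Int)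
    (xs : List (Int × Int)) :
    pvRun res temp d (x :: xs) =
      pvRun (pyStepA (res, temp, d) x).1 (pyStepA (res, temp, d) x).2.1
        (pyStepA (res, temp, d) x).2.2 xs := rfl

-- the accumulator res is only ever appended to, so it factors out of the fold
lemma pvRun_res : ∀ (xs res temp : List (Int × Int)) (d : Bool),
    pvRun res temp d xs = res ++ pvRun [] temp d xs := by
  intro xs
  induction xs with
  | nil => intro res temp d; simp [pvRun]
  | cons x xs ih =>
    intro res temp d
    rw [pvRun_cons, pvRun_cons]
    match temp with
    | [] =>
      simp only [pyStepA, List.nil_append]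
      rw [ih res, ih []]
    | t :: ts =>
      by_cases h : x.1 = t.1
      · simp only [pyStepA, h, ne_eq, not_true_eq_false, if_false]
        rw [ih res, ih []]
      · simp only [pyStepA, h, ne_eq, not_false_eq_true, if_true, List.nil_append]
        rw [ih (res ++ _), ih (PySem.List.sorted _ _ _)]
        simp

lemma runLen_all (k : Int) (ts : List (Int × Int)) (h : ∀ p ∈ ts, p.1 = k) :
    runLen k ts = ts.length := by
  induction ts with
  | nil => rfl
  | cons t ts ih =>
    simp only [runLen, h t (by simp), if_true, List.length_cons]
    rw [ih (fun p hp => h p (by simp [hp]))]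

lemma runLen_append_ne (k : Int) (ts : List (Int × Int)) (x : Int × Int)
    (xs : List (Int × Int)) (h : ∀ p ∈ ts, p.1 = k) (hx : x.1 ≠ k) :
    runLen k (ts ++ x :: xs) = ts.length := by
  induction ts with
  | nil => simp [runLen, hx]
  | cons t ts ih =>
    simp only [List.cons_append, runLen, h t (by simp), if_true, List.length_cons]
    rw [ih (fun p hp => h p (by simp [hp]))]

-- the output accumulator of B's loop factors out
lemma emitRuns_acc_aux : ∀ (n : Nat) (l : List (Int × Int)), l.length ≤ n →
    ∀ (asc : Bool) (out : List (Int × Int)),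
    emitRuns l asc out = out ++ emitRuns l asc [] := by
  intro n
  induction n with
  | zero =>
    intro l hl asc out
    have : l = [] := List.eq_nil_of_length_eq_zero (Nat.le_zero.1 hl)
    subst this; simp [emitRuns]
  | succ n ih =>
    intro l hl asc out
    match l with
    | [] => simp [emitRuns]
    | x :: xs =>
      have hxs : (xs.drop (runLen x.1 xs)).length ≤ n := by
        simp only [List.length_cons] at hl
        simp only [List.length_drop]
        omega
      unfold emitRuns
      rw [ih _ hxs, ih _ hxs (out := [] ++ _)]
      simp

lemma emitRuns_acc (l : List (Int × Int)) (asc : Bool) (out : List (Int × Int)) :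
    emitRuns l asc out = out ++ emitRuns l asc [] :=
  emitRuns_acc_aux l.length l le_rfl asc out

-- main invariant: A's fold, holding a pending run t :: ts (all keys equal), computes
-- B's run decomposition of the remaining input prefixed with that run
lemma pvRun_emit : ∀ (xs : List (Int × Int)) (t : Int × Int) (ts : List (Int × Int)) (d : Bool),
    (∀ p ∈ ts, p.1 = t.1) →
    pvRun [] (t :: ts) d xs = emitRuns ((t :: ts) ++ xs) d [] := by
  intro xs
  induction xs with
  | nil =>
    intro t ts d h
    rw [List.append_nil]
    unfold emitRuns
    simp [pvRun, emitRuns, runLen_all t.1 ts h]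
  | cons x xs ih =>
    intro t ts d h
    rw [pvRun_cons]
    by_cases hx : x.1 = t.1
    · simp only [pyStepA, hx, ne_eq, not_true_eq_false, if_false]
      have hts : ∀ p ∈ ts ++ [x], p.1 = t.1 := by
        intro p hp
        rcases List.mem_append.1 hp with hp | hp
        · exact h p hp
        · simp at hp; simp [hp, hx]
      have := ih t (ts ++ [x]) d hts
      simp only [List.cons_append] at this ⊢
      rw [this]
      simp
    · simp only [pyStepA, hx, ne_eq, not_false_eq_true, if_true, List.nil_append]
      rw [pvRun_res, ih x [] (!d) (by simp)]
      have hm : runLen t.1 (ts ++ x :: xs) = ts.length := runLen_append_ne t.1 ts x xs h hx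
      conv_rhs => rw [List.cons_append]; unfold emitRuns
      simp only [hm, List.take_left, List.drop_left]
      simp only [List.nil_append]
      rw [emitRuns_acc (x :: xs) (!d)]
      simp

theorem pvMain (nL : List (Int × Int)) :
    optimizeNoteSequence_py nL = optimizeNoteSequence_py_alt nL := by
  match nL with
  | [] => simp [optimizeNoteSequence_py, optimizeNoteSequence_py_alt, emitRuns]
  | y :: ys =>
    have hA : optimizeNoteSequence_py (y :: ys) = pvRun [] [y] true ys := by
      simp [optimizeNoteSequence_py, pvRun, pyStepA]
    rw [hA, pvRun_emit ys y [] true (by simp)]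
    rfl

-- ===== VERDICT (by name: the statement is the Claim_ definition above) =====
theorem optimizeNoteSequence_py_spec : Claim_equal_optimizeNoteSequence_py := by
  intro nL _
  unfold Spec_optimizeNoteSequence_py
  exact pvMain nL
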